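-- pv_equiv track=rewrite | github.com/gibinbom/Trading-Server | Disclosure/delayed_quote_collector.py | _default_schedule_times
-- ===== SOURCE A (Python) =====
-- def _default_schedule_times(mode: str = "full") -> str:
--     if mode == "hotset":
--         slots: list[str] = []
--         for hour in range(9, 16):
--             for minute in range(0, 60):
--                 if hour == 9 and minute < 6:
--                     continue
--                 if minute % 5 == 0:
--                     continue
--                 if hour == 15 and minute > 44:
--                     continue
--                 slots.append(f"{hour:02d}:{minute:02d}")
--         return ",".join(slots)
--     slots = ["08:15"]
--     for hour in range(9, 16):
--         for minute in range(0, 60, 5):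
--             if hour == 9 and minute < 5:
--                 continue
--             if hour == 15 and minute > 45:
--                 continue
--             slots.append(f"{hour:02d}:{minute:02d}")
--     slots.append("20:15")
--     return ",".join(slots)
-- ===== SOURCE B (Python) =====
-- def _default_schedule_times(mode: str = "full") -> str:
--     def fmt(t: int) -> str:
--         return f"{t // 60:02d}:{t % 60:02d}"
--     if mode == "hotset":
--         return ",".join(fmt(t) for t in range(9 * 60 + 6, 15 * 60 + 45) if t % 5 != 0)
--     slots = ["08:15"] + [fmt(t) for t in range(9 * 60 + 5, 15 * 60 + 46, 5)] + ["20:15"]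
--     return ",".join(slots)
-- ===== Notes on version B (the rewrite author's own statement) =====
-- stated objective: simpler
-- what changed: Replaces the two nested hour/minute loops (with three continue guards each) by a single flat pass over minute-of-day integers with exact range endpoints, formatting via t//60 and t%60.
import Mathlib
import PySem

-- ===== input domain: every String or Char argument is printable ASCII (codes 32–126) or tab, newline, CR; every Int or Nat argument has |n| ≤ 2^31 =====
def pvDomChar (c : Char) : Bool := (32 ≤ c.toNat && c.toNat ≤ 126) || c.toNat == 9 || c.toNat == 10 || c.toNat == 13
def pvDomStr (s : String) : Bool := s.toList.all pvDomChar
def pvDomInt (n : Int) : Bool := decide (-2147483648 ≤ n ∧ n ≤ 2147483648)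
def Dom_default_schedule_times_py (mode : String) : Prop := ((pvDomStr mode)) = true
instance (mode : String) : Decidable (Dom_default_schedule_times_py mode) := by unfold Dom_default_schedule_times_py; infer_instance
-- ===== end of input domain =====

-- B replaces A's nested hour/minute loops (with their continue-guards) by a single flat pass
-- over minute-of-day integers with exact range endpoints (simpler decomposition; same output).

-- ===== PORT A =====
-- f"{n:02d}" = str(n).zfill(2): exact via PySem.Str.zfill / PySem.Int.toStr
def pvPad2 (n : Int) : String := PySem.Str.zfill (PySem.Int.toStr n) 2

def default_schedule_times_py (mode : String) : String :=
  if mode = "hotset" then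
    PySem.Str.join ","
      ((PySem.List.pyRange 9 16 1).foldl (fun acc hour =>
        (PySem.List.pyRange 0 60 1).foldl (fun acc minute =>
          if hour = 9 ∧ minute < 6 then acc
          else if PySem.Int.mod minute 5 = 0 then acc
          else if hour = 15 ∧ minute > 44 then acc
          else acc ++ [pvPad2 hour ++ ":" ++ pvPad2 minute]) acc) [])
  else
    PySem.Str.join ","
      (((PySem.List.pyRange 9 16 1).foldl (fun acc hour =>
        (PySem.List.pyRange 0 60 5).foldl (fun acc minute =>
          if hour = 9 ∧ minute < 5 then acc
          else if hour = 15 ∧ minute > 45 then acc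
          else acc ++ [pvPad2 hour ++ ":" ++ pvPad2 minute]) acc) ["08:15"]) ++ ["20:15"])

-- ===== PORT B =====
-- Source B's fmt(t) = f"{t // 60:02d}:{t % 60:02d}"
def pvFmt (t : Int) : String :=
  pvPad2 (PySem.Int.floordiv t 60) ++ ":" ++ pvPad2 (PySem.Int.mod t 60)

def default_schedule_times_py_alt (mode : String) : String :=
  if mode = "hotset" then
    PySem.Str.join ","
      (((PySem.List.pyRange (9*60+6) (15*60+45) 1).filter
          (fun t => decide (PySem.Int.mod t 5 ≠ 0))).map pvFmt)
  else
    PySem.Str.join ","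
      (["08:15"] ++ (PySem.List.pyRange (9*60+5) (15*60+46) 5).map pvFmt ++ ["20:15"])

-- ===== PRECONDITION & SPEC =====
def Spec_default_schedule_times_py (mode : String) (out : String) : Prop := out = default_schedule_times_py_alt mode
instance (mode : String) (out : String) : Decidable (Spec_default_schedule_times_py mode out) := by unfold Spec_default_schedule_times_py; infer_instance

-- ===== CLAIM (what is proved, stated in full; the proofs are below) =====
def Claim_equal_default_schedule_times_py : Prop := ∀ (mode : String), Dom_default_schedule_times_py mode → Spec_default_schedule_times_py mode (default_schedule_times_py mode)

-- ===== LEMMAS AND PROOFS =====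

-- predicates of A's continue-guards (hotset / full inner loops) and B's filter
def pvHot (h m : Int) : Bool := decide (¬(h = 9 ∧ m < 6) ∧ ¬(PySem.Int.mod m 5 = 0) ∧ ¬(h = 15 ∧ m > 44))
def pvFull (h m : Int) : Bool := decide (¬(h = 9 ∧ m < 5) ∧ ¬(h = 15 ∧ m > 45))
def pvQ (t : Int) : Bool := decide (PySem.Int.mod t 5 ≠ 0)
-- per-hour slot lists
def pvGH (h : Int) : List String :=
  ((PySem.List.pyRange 0 60 1).filter (pvHot h)).map (fun m => pvPad2 h ++ ":" ++ pvPad2 m)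
def pvGF (h : Int) : List String :=
  ((PySem.List.pyRange 0 60 5).filter (pvFull h)).map (fun m => pvPad2 h ++ ":" ++ pvPad2 m)

lemma pv_loopHot (h : Int) (l : List Int) (acc : List String) :
    l.foldl (fun acc minute =>
      if h = 9 ∧ minute < 6 then acc
      else if PySem.Int.mod minute 5 = 0 then acc
      else if h = 15 ∧ minute > 44 then acc
      else acc ++ [pvPad2 h ++ ":" ++ pvPad2 minute]) acc
    = acc ++ (l.filter (pvHot h)).map (fun m => pvPad2 h ++ ":" ++ pvPad2 m) := by
  induction l generalizing acc with
  | nil => simp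
  | cons x xs ih =>
    rw [List.foldl_cons, List.filter_cons]
    by_cases h1 : h = 9 ∧ x < 6
    · have hv : pvHot h x = false := by
        simp only [pvHot, decide_eq_false_iff_not]; rintro ⟨a, -, -⟩; exact a h1
      rw [if_pos h1, ih, hv]
      simp
    · by_cases h2 : PySem.Int.mod x 5 = 0
      · have hv : pvHot h x = false := by
          simp only [pvHot, decide_eq_false_iff_not]; rintro ⟨-, b, -⟩; exact b h2
        rw [if_neg h1, if_pos h2, ih, hv]
        simp
      · by_cases h3 : h = 15 ∧ x > 44
        · have hv : pvHot h x = false := by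
            simp only [pvHot, decide_eq_false_iff_not]; rintro ⟨-, -, c⟩; exact c h3
          rw [if_neg h1, if_neg h2, if_pos h3, ih, hv]
          simp
        · have hv : pvHot h x = true := by
            simp only [pvHot, decide_eq_true_eq]; exact ⟨h1, h2, h3⟩
          rw [if_neg h1, if_neg h2, if_neg h3, ih, hv]
          simp [List.append_assoc]

lemma pv_loopFull (h : Int) (l : List Int) (acc : List String) :
    l.foldl (fun acc minute =>
      if h = 9 ∧ minute < 5 then acc
      else if h = 15 ∧ minute > 45 then acc
      else acc ++ [pvPad2 h ++ ":" ++ pvPad2 minute]) acc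
    = acc ++ (l.filter (pvFull h)).map (fun m => pvPad2 h ++ ":" ++ pvPad2 m) := by
  induction l generalizing acc with
  | nil => simp
  | cons x xs ih =>
    rw [List.foldl_cons, List.filter_cons]
    by_cases h1 : h = 9 ∧ x < 5
    · have hv : pvFull h x = false := by
        simp only [pvFull, decide_eq_false_iff_not]; rintro ⟨a, -⟩; exact a h1
      rw [if_pos h1, ih, hv]
      simp
    · by_cases h2 : h = 15 ∧ x > 45
      · have hv : pvFull h x = false := by
          simp only [pvFull, decide_eq_false_iff_not]; rintro ⟨-, b⟩; exact b h2
        rw [if_neg h1, if_pos h2, ih, hv]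
        simp
      · have hv : pvFull h x = true := by
          simp only [pvFull, decide_eq_true_eq]; exact ⟨h1, h2⟩
        rw [if_neg h1, if_neg h2, ih, hv]
        simp [List.append_assoc]

lemma pv_outerHot (l : List Int) (acc : List String) :
    l.foldl (fun acc hour =>
      (PySem.List.pyRange 0 60 1).foldl (fun acc minute =>
        if hour = 9 ∧ minute < 6 then acc
        else if PySem.Int.mod minute 5 = 0 then acc
        else if hour = 15 ∧ minute > 44 then acc
        else acc ++ [pvPad2 hour ++ ":" ++ pvPad2 minute]) acc) acc
    = acc ++ l.flatMap pvGH := by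
  have hf : (fun (acc : List String) (hour : Int) =>
      (PySem.List.pyRange 0 60 1).foldl (fun acc minute =>
        if hour = 9 ∧ minute < 6 then acc
        else if PySem.Int.mod minute 5 = 0 then acc
        else if hour = 15 ∧ minute > 44 then acc
        else acc ++ [pvPad2 hour ++ ":" ++ pvPad2 minute]) acc)
      = fun acc hour => acc ++ pvGH hour :=
    funext fun acc => funext fun hour => pv_loopHot hour _ acc
  rw [hf]
  exact PySem.List.foldl_append_eq_flatMap pvGH l acc

lemma pv_outerFull (l : List Int) (acc : List String) :
    l.foldl (fun acc hour =>
      (PySem.List.pyRange 0 60 5).foldl (fun acc minute =>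
        if hour = 9 ∧ minute < 5 then acc
        else if hour = 15 ∧ minute > 45 then acc
        else acc ++ [pvPad2 hour ++ ":" ++ pvPad2 minute]) acc) acc
    = acc ++ l.flatMap pvGF := by
  have hf : (fun (acc : List String) (hour : Int) =>
      (PySem.List.pyRange 0 60 5).foldl (fun acc minute =>
        if hour = 9 ∧ minute < 5 then acc
        else if hour = 15 ∧ minute > 45 then acc
        else acc ++ [pvPad2 hour ++ ":" ++ pvPad2 minute]) acc)
      = fun acc hour => acc ++ pvGF hour :=
    funext fun acc => funext fun hour => pv_loopFull hour _ acc
  rw [hf]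
  exact PySem.List.foldl_append_eq_flatMap pvGF l acc

lemma pv_hours : PySem.List.pyRange 9 16 1 = [9, 10, 11, 12, 13, 14, 15] := by
  rw [PySem.List.pyRange_one_cons (by norm_num), PySem.List.pyRange_one_cons (by norm_num),
    PySem.List.pyRange_one_cons (by norm_num), PySem.List.pyRange_one_cons (by norm_num),
    PySem.List.pyRange_one_cons (by norm_num), PySem.List.pyRange_one_cons (by norm_num),
    PySem.List.pyRange_one_cons (by norm_num), PySem.List.pyRange_one_eq_nil (by norm_num)]
  norm_num

-- arithmetic bridges
lemma pv_modshift (h m : Int) : PySem.Int.mod (60*h + m) 5 = PySem.Int.mod m 5 := by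
  rw [PySem.Int.mod_eq_emod_of_pos (by norm_num), PySem.Int.mod_eq_emod_of_pos (by norm_num)]
  omega

lemma pv_fmt_eq (h m : Int) (h0 : 0 ≤ m) (h60 : m < 60) :
    pvFmt (60*h + m) = pvPad2 h ++ ":" ++ pvPad2 m := by
  have hd : PySem.Int.floordiv (60*h + m) 60 = h :=
    (PySem.Int.floordiv_eq_iff_of_pos (by norm_num)).mpr ⟨by omega, by omega⟩
  have hm : PySem.Int.mod (60*h + m) 60 = m := by
    have := PySem.Int.floordiv_mul_add_mod (60*h + m) 60
    rw [hd] at this; omega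
  rw [pvFmt, hd, hm]

-- range shifting
lemma pv_shift1 (c a b : Int) :
    PySem.List.pyRange (c+a) (c+b) 1 = (PySem.List.pyRange a b 1).map (fun m => c + m) := by
  rw [PySem.List.pyRange_one, PySem.List.pyRange_one, List.map_map,
    show c + b - (c + a) = b - a by ring]
  exact List.map_congr_left fun k _ => by simp [Function.comp]; ring

lemma pv_shift5 (c a b : Int) :
    PySem.List.pyRange (c+a) (c+b) 5 = (PySem.List.pyRange a b 5).map (fun m => c + m) := by
  rw [PySem.List.pyRange_of_pos _ _ (by norm_num : (0:Int) < 5),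
    PySem.List.pyRange_of_pos _ _ (by norm_num : (0:Int) < 5), List.map_map,
    show c + b - (c + a) + 5 - 1 = b - a + 5 - 1 by ring]
  simp only [add_lt_add_iff_left]
  exact List.map_congr_left fun k _ => by simp [Function.comp]; ring

lemma pv_split5 (a m b : Int) (n1 n2 : Nat)
    (e1 : (if a < b then ((b - a + 5 - 1) / 5).toNat else 0) = n1 + n2)
    (e2 : (if a < m then ((m - a + 5 - 1) / 5).toNat else 0) = n1)
    (e3 : (if m < b then ((b - m + 5 - 1) / 5).toNat else 0) = n2)
    (hm : m = a + 5 * (n1 : Int)) :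
    PySem.List.pyRange a b 5 = PySem.List.pyRange a m 5 ++ PySem.List.pyRange m b 5 := by
  rw [PySem.List.pyRange_of_pos _ _ (by norm_num : (0:Int) < 5),
    PySem.List.pyRange_of_pos _ _ (by norm_num : (0:Int) < 5),
    PySem.List.pyRange_of_pos _ _ (by norm_num : (0:Int) < 5),
    e1, e2, e3, List.range_add, List.map_append, List.map_map]
  congr 1
  refine List.map_congr_left fun j _ => ?_
  simp only [Function.comp_apply]
  rw [hm]
  push_cast
  ring

-- per-hour chunk bridges (step 1, hotset)
lemma pv_chunk1 (h a b : Int) (h0 : 0 ≤ a) (hb : b ≤ 60) :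
    ((PySem.List.pyRange (60*h + a) (60*h + b) 1).filter pvQ).map pvFmt
      = ((PySem.List.pyRange a b 1).filter pvQ).map (fun m => pvPad2 h ++ ":" ++ pvPad2 m) := by
  rw [pv_shift1, List.filter_map]
  have hq : (pvQ ∘ fun m => 60*h + m) = pvQ := funext fun m => by
    simp only [Function.comp_apply, pvQ, pv_modshift]
  rw [hq, List.map_map]
  refine List.map_congr_left fun m hm => ?_
  have hmem := PySem.List.mem_pyRange_one.mp (List.mem_of_mem_filter hm)
  exact pv_fmt_eq h m (by omega) (by omega)

-- per-hour chunk bridges (step 5, full)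
lemma pv_chunk5 (h a b : Int) (h0 : 0 ≤ a) (hb : b ≤ 60) :
    ((PySem.List.pyRange (60*h + a) (60*h + b) 5).map pvFmt)
      = (PySem.List.pyRange a b 5).map (fun m => pvPad2 h ++ ":" ++ pvPad2 m) := by
  rw [pv_shift5, List.map_map]
  refine List.map_congr_left fun m hm => ?_
  have hmem := (PySem.List.mem_pyRange_iff_of_pos (by norm_num : (0:Int) < 5) m).mp hm
  exact pv_fmt_eq h m (by omega) (by omega)

-- A-side per-hour filter simplifications (hotset)
lemma pv_gh9 : pvGH 9 = ((PySem.List.pyRange 6 60 1).filter pvQ).map (fun m => pvPad2 9 ++ ":" ++ pvPad2 m) := by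
  rw [pvGH, PySem.List.pyRange_one_append 0 6 60 (by norm_num) (by norm_num), List.filter_append]
  have h1 : (PySem.List.pyRange 0 6 1).filter (pvHot 9) = [] :=
    List.filter_eq_nil_iff.mpr fun m hm => by
      have := PySem.List.mem_pyRange_one.mp hm
      simp only [pvHot, decide_eq_true_eq]
      rintro ⟨a, -, -⟩; exact a ⟨by trivial, by omega⟩
  have h2 : (PySem.List.pyRange 6 60 1).filter (pvHot 9) = (PySem.List.pyRange 6 60 1).filter pvQ :=
    List.filter_congr fun m hm => by
      have := PySem.List.mem_pyRange_one.mp hm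
      simp only [pvHot, pvQ, decide_eq_decide]
      constructor
      · rintro ⟨-, b, -⟩; exact b
      · intro b; exact ⟨fun ⟨_, hlt⟩ => by omega, b, fun ⟨h15, _⟩ => by norm_num at h15⟩
  rw [h1, h2, List.nil_append]

lemma pv_ghMid (h : Int) (h9 : h ≠ 9) (h15 : h ≠ 15) :
    pvGH h = ((PySem.List.pyRange 0 60 1).filter pvQ).map (fun m => pvPad2 h ++ ":" ++ pvPad2 m) := by
  rw [pvGH]
  congr 1
  refine List.filter_congr fun m _ => ?_
  simp only [pvHot, pvQ, decide_eq_decide]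
  constructor
  · rintro ⟨-, b, -⟩; exact b
  · intro b; exact ⟨fun ⟨hh, _⟩ => h9 hh, b, fun ⟨hh, _⟩ => h15 hh⟩

lemma pv_gh15 : pvGH 15 = ((PySem.List.pyRange 0 45 1).filter pvQ).map (fun m => pvPad2 15 ++ ":" ++ pvPad2 m) := by
  rw [pvGH, PySem.List.pyRange_one_append 0 45 60 (by norm_num) (by norm_num), List.filter_append]
  have h1 : (PySem.List.pyRange 45 60 1).filter (pvHot 15) = [] :=
    List.filter_eq_nil_iff.mpr fun m hm => by
      have := PySem.List.mem_pyRange_one.mp hm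
      simp only [pvHot, decide_eq_true_eq]
      rintro ⟨-, -, c⟩; exact c ⟨by trivial, by omega⟩
  have h2 : (PySem.List.pyRange 0 45 1).filter (pvHot 15) = (PySem.List.pyRange 0 45 1).filter pvQ :=
    List.filter_congr fun m hm => by
      have := PySem.List.mem_pyRange_one.mp hm
      simp only [pvHot, pvQ, decide_eq_decide]
      constructor
      · rintro ⟨-, b, -⟩; exact b
      · intro b; exact ⟨fun ⟨h9, _⟩ => by norm_num at h9, b, fun ⟨_, hgt⟩ => by omega⟩
  rw [h1, h2, List.append_nil]

-- A-side per-hour filter simplifications (full)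
lemma pv_gf9 : pvGF 9 = (PySem.List.pyRange 5 60 5).map (fun m => pvPad2 9 ++ ":" ++ pvPad2 m) := by
  rw [pvGF, pv_split5 0 5 60 1 11 (by decide) (by decide) (by decide) (by norm_num), List.filter_append]
  have h0 : PySem.List.pyRange 0 5 5 = [0] := by
    rw [PySem.List.pyRange_of_pos _ _ (by norm_num : (0:Int) < 5)]
    norm_num [List.range_succ]
  have h1 : (PySem.List.pyRange 0 5 5).filter (pvFull 9) = [] := by
    rw [h0]
    simp [pvFull]
  have h2 : (PySem.List.pyRange 5 60 5).filter (pvFull 9) = PySem.List.pyRange 5 60 5 :=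
    List.filter_eq_self.mpr fun m hm => by
      have := (PySem.List.mem_pyRange_iff_of_pos (by norm_num : (0:Int) < 5) m).mp hm
      simp only [pvFull, decide_eq_true_eq]
      exact ⟨fun ⟨_, hlt⟩ => by omega, fun ⟨h15, _⟩ => by norm_num at h15⟩
  rw [h1, h2, List.nil_append]

lemma pv_gfMid (h : Int) (h9 : h ≠ 9) (h15 : h ≠ 15) :
    pvGF h = (PySem.List.pyRange 0 60 5).map (fun m => pvPad2 h ++ ":" ++ pvPad2 m) := by
  rw [pvGF]
  congr 1
  refine List.filter_eq_self.mpr fun m _ => ?_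
  simp only [pvFull, decide_eq_true_eq]
  exact ⟨fun ⟨hh, _⟩ => h9 hh, fun ⟨hh, _⟩ => h15 hh⟩

lemma pv_gf15 : pvGF 15 = (PySem.List.pyRange 0 50 5).map (fun m => pvPad2 15 ++ ":" ++ pvPad2 m) := by
  rw [pvGF, pv_split5 0 50 60 10 2 (by decide) (by decide) (by decide) (by norm_num), List.filter_append]
  have h1 : (PySem.List.pyRange 50 60 5).filter (pvFull 15) = [] :=
    List.filter_eq_nil_iff.mpr fun m hm => by
      have := (PySem.List.mem_pyRange_iff_of_pos (by norm_num : (0:Int) < 5) m).mp hm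
      simp only [pvFull, decide_eq_true_eq]
      rintro ⟨-, c⟩; exact c ⟨by trivial, by omega⟩
  have h2 : (PySem.List.pyRange 0 50 5).filter (pvFull 15) = PySem.List.pyRange 0 50 5 :=
    List.filter_eq_self.mpr fun m hm => by
      have := (PySem.List.mem_pyRange_iff_of_pos (by norm_num : (0:Int) < 5) m).mp hm
      simp only [pvFull, decide_eq_true_eq]
      exact ⟨fun ⟨h9, _⟩ => by norm_num at h9, fun ⟨_, hgt⟩ => by omega⟩
  rw [h1, h2, List.append_nil]

-- the two branch equalities
lemma pv_hot_lists :
    ((PySem.List.pyRange (9*60+6) (15*60+45) 1).filter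
        (fun t => decide (PySem.Int.mod t 5 ≠ 0))).map pvFmt
      = [9, 10, 11, 12, 13, 14, 15].flatMap pvGH := by
  have hsplit : PySem.List.pyRange (9*60+6) (15*60+45) 1
      = PySem.List.pyRange 546 600 1 ++ PySem.List.pyRange 600 660 1 ++ PySem.List.pyRange 660 720 1
        ++ PySem.List.pyRange 720 780 1 ++ PySem.List.pyRange 780 840 1 ++ PySem.List.pyRange 840 900 1
        ++ PySem.List.pyRange 900 945 1 := by
    rw [show ((9:Int)*60+6) = 546 by norm_num, show ((15:Int)*60+45) = 945 by norm_num,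
      PySem.List.pyRange_one_append 546 600 945 (by norm_num) (by norm_num),
      PySem.List.pyRange_one_append 600 660 945 (by norm_num) (by norm_num),
      PySem.List.pyRange_one_append 660 720 945 (by norm_num) (by norm_num),
      PySem.List.pyRange_one_append 720 780 945 (by norm_num) (by norm_num),
      PySem.List.pyRange_one_append 780 840 945 (by norm_num) (by norm_num),
      PySem.List.pyRange_one_append 840 900 945 (by norm_num) (by norm_num)]
    simp [List.append_assoc]
  have hQ : (fun t => decide (PySem.Int.mod t 5 ≠ 0)) = pvQ := rfl
  rw [hQ, hsplit]
  simp only [List.filter_append, List.map_append]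
  have c9 : ((PySem.List.pyRange 546 600 1).filter pvQ).map pvFmt = pvGH 9 := by
    rw [show (546:Int) = 60*9+6 by norm_num, show (600:Int) = 60*9+60 by norm_num]
    rw [pv_chunk1 9 6 60 (by norm_num) (by norm_num), ← pv_gh9]
  have c10 : ((PySem.List.pyRange 600 660 1).filter pvQ).map pvFmt = pvGH 10 := by
    rw [show (600:Int) = 60*10+0 by norm_num, show (660:Int) = 60*10+60 by norm_num]
    rw [pv_chunk1 10 0 60 (by norm_num) (by norm_num), ← pv_ghMid 10 (by norm_num) (by norm_num)]
  have c11 : ((PySem.List.pyRange 660 720 1).filter pvQ).map pvFmt = pvGH 11 := by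
    rw [show (660:Int) = 60*11+0 by norm_num, show (720:Int) = 60*11+60 by norm_num]
    rw [pv_chunk1 11 0 60 (by norm_num) (by norm_num), ← pv_ghMid 11 (by norm_num) (by norm_num)]
  have c12 : ((PySem.List.pyRange 720 780 1).filter pvQ).map pvFmt = pvGH 12 := by
    rw [show (720:Int) = 60*12+0 by norm_num, show (780:Int) = 60*12+60 by norm_num]
    rw [pv_chunk1 12 0 60 (by norm_num) (by norm_num), ← pv_ghMid 12 (by norm_num) (by norm_num)]
  have c13 : ((PySem.List.pyRange 780 840 1).filter pvQ).map pvFmt = pvGH 13 := by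
    rw [show (780:Int) = 60*13+0 by norm_num, show (840:Int) = 60*13+60 by norm_num]
    rw [pv_chunk1 13 0 60 (by norm_num) (by norm_num), ← pv_ghMid 13 (by norm_num) (by norm_num)]
  have c14 : ((PySem.List.pyRange 840 900 1).filter pvQ).map pvFmt = pvGH 14 := by
    rw [show (840:Int) = 60*14+0 by norm_num, show (900:Int) = 60*14+60 by norm_num]
    rw [pv_chunk1 14 0 60 (by norm_num) (by norm_num), ← pv_ghMid 14 (by norm_num) (by norm_num)]
  have c15 : ((PySem.List.pyRange 900 945 1).filter pvQ).map pvFmt = pvGH 15 := by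
    rw [show (900:Int) = 60*15+0 by norm_num, show (945:Int) = 60*15+45 by norm_num]
    rw [pv_chunk1 15 0 45 (by norm_num) (by norm_num), ← pv_gh15]
  rw [c9, c10, c11, c12, c13, c14, c15]
  simp [List.flatMap_cons, List.append_assoc]

lemma pv_full_lists :
    (PySem.List.pyRange (9*60+5) (15*60+46) 5).map pvFmt
      = [9, 10, 11, 12, 13, 14, 15].flatMap pvGF := by
  have h946 : PySem.List.pyRange 900 946 5 = PySem.List.pyRange 900 950 5 := by
    rw [PySem.List.pyRange_of_pos _ _ (by norm_num : (0:Int) < 5),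
      PySem.List.pyRange_of_pos _ _ (by norm_num : (0:Int) < 5)]
    norm_num
  have hsplit : PySem.List.pyRange (9*60+5) (15*60+46) 5
      = PySem.List.pyRange 545 600 5 ++ PySem.List.pyRange 600 660 5 ++ PySem.List.pyRange 660 720 5
        ++ PySem.List.pyRange 720 780 5 ++ PySem.List.pyRange 780 840 5 ++ PySem.List.pyRange 840 900 5
        ++ PySem.List.pyRange 900 950 5 := by
    rw [show ((9:Int)*60+5) = 545 by norm_num, show ((15:Int)*60+46) = 946 by norm_num,
      pv_split5 545 600 946 11 70 (by decide) (by decide) (by decide) (by norm_num),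
      pv_split5 600 660 946 12 58 (by decide) (by decide) (by decide) (by norm_num),
      pv_split5 660 720 946 12 46 (by decide) (by decide) (by decide) (by norm_num),
      pv_split5 720 780 946 12 34 (by decide) (by decide) (by decide) (by norm_num),
      pv_split5 780 840 946 12 22 (by decide) (by decide) (by decide) (by norm_num),
      pv_split5 840 900 946 12 10 (by decide) (by decide) (by decide) (by norm_num),
      h946]
    simp [List.append_assoc]
  rw [hsplit]
  simp only [List.map_append]
  have c9 : (PySem.List.pyRange 545 600 5).map pvFmt = pvGF 9 := by
    rw [show (545:Int) = 60*9+5 by norm_num, show (600:Int) = 60*9+60 by norm_num]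
    rw [pv_chunk5 9 5 60 (by norm_num) (by norm_num), ← pv_gf9]
  have c10 : (PySem.List.pyRange 600 660 5).map pvFmt = pvGF 10 := by
    rw [show (600:Int) = 60*10+0 by norm_num, show (660:Int) = 60*10+60 by norm_num]
    rw [pv_chunk5 10 0 60 (by norm_num) (by norm_num), ← pv_gfMid 10 (by norm_num) (by norm_num)]
  have c11 : (PySem.List.pyRange 660 720 5).map pvFmt = pvGF 11 := by
    rw [show (660:Int) = 60*11+0 by norm_num, show (720:Int) = 60*11+60 by norm_num]
    rw [pv_chunk5 11 0 60 (by norm_num) (by norm_num), ← pv_gfMid 11 (by norm_num) (by norm_num)]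
  have c12 : (PySem.List.pyRange 720 780 5).map pvFmt = pvGF 12 := by
    rw [show (720:Int) = 60*12+0 by norm_num, show (780:Int) = 60*12+60 by norm_num]
    rw [pv_chunk5 12 0 60 (by norm_num) (by norm_num), ← pv_gfMid 12 (by norm_num) (by norm_num)]
  have c13 : (PySem.List.pyRange 780 840 5).map pvFmt = pvGF 13 := by
    rw [show (780:Int) = 60*13+0 by norm_num, show (840:Int) = 60*13+60 by norm_num]
    rw [pv_chunk5 13 0 60 (by norm_num) (by norm_num), ← pv_gfMid 13 (by norm_num) (by norm_num)]
  have c14 : (PySem.List.pyRange 840 900 5).map pvFmt = pvGF 14 := by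
    rw [show (840:Int) = 60*14+0 by norm_num, show (900:Int) = 60*14+60 by norm_num]
    rw [pv_chunk5 14 0 60 (by norm_num) (by norm_num), ← pv_gfMid 14 (by norm_num) (by norm_num)]
  have c15 : (PySem.List.pyRange 900 950 5).map pvFmt = pvGF 15 := by
    rw [show (900:Int) = 60*15+0 by norm_num, show (950:Int) = 60*15+50 by norm_num]
    rw [pv_chunk5 15 0 50 (by norm_num) (by norm_num), ← pv_gf15]
  rw [c9, c10, c11, c12, c13, c14, c15]
  simp [List.flatMap_cons, List.append_assoc]

-- ===== VERDICT (by name: the statement is the Claim_ definition above) =====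
theorem default_schedule_times_py_spec : Claim_equal_default_schedule_times_py := by
  intro mode _
  unfold Spec_default_schedule_times_py default_schedule_times_py default_schedule_times_py_alt
  by_cases h : mode = "hotset"
  · rw [if_pos h, if_pos h]
    refine congrArg (PySem.Str.join ",") ?_
    rw [pv_outerHot, pv_hours, pv_hot_lists, List.nil_append]
  · rw [if_neg h, if_neg h]
    refine congrArg (PySem.Str.join ",") ?_
    rw [pv_outerFull, pv_hours, pv_full_lists]
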